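-- pv_equiv track=rewrite | github.com/jumpei00/algorithm | udemy/section12/snake.py | snake_string_v1
-- ===== SOURCE A (Python) =====
-- def snake_string_v1(chars: str):
--     result = [[], [], []]
--     result_indexes = {0, 1, 2}
--     insert_index = 1
--     for i, s in enumerate(chars):
--         if i % 4 == 1:
--             insert_index = 0
--         elif i % 2 == 0:
--             insert_index = 1
--         elif i % 4 == 3:
--             insert_index = 2
--         result[insert_index].append(s)
--         for rest_index in result_indexes - {insert_index}:
--             result[rest_index].append(' ')
--
--     return result
-- ===== SOURCE B (Python) =====
-- def snake_string_v1(chars: str):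
--     ROW = (1, 0, 1, 2)
--     return [[c if ROW[i % 4] == r else ' ' for i, c in enumerate(chars)]
--             for r in range(3)]
-- ===== Notes on version B (the rewrite author's own statement) =====
-- stated objective: simpler
-- what changed: Replaces the stateful branch chain, running insert_index and per-step set-difference fill with a period-4 row lookup table and a per-row comprehension over the whole string.
import Mathlib
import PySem

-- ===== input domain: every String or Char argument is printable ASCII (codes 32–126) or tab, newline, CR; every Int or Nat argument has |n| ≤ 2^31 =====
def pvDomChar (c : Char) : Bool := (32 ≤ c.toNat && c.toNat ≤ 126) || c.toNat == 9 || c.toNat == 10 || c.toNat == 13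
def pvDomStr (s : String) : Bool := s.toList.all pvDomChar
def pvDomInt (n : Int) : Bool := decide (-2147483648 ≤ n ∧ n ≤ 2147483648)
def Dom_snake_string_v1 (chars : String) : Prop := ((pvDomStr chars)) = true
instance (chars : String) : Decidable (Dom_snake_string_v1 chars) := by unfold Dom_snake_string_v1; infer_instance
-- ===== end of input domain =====

-- B replaces A's stateful branch chain + set-difference fill with a period-4
-- row-lookup table and one per-row pass over the string (objective: simpler).


-- ===== PORT A =====
-- result[k].append(x) on the 3-row state
def pvAppendAt (st : List String × List String × List String) (k : Nat) (x : String) :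
    List String × List String × List String :=
  match k with
  | 0 => (st.1 ++ [x], st.2.1, st.2.2)
  | 1 => (st.1, st.2.1 ++ [x], st.2.2)
  | _ => (st.1, st.2.1, st.2.2 ++ [x])

-- the for-loop of A: index i, carried insert_index ii, 3-row state
def snakeLoopA : List Char → Nat → Nat → (List String × List String × List String) →
    List String × List String × List String
  | [], _, _, st => st
  | c :: t, i, ii, st =>
    let ii' := if i % 4 = 1 then 0 else if i % 2 = 0 then 1 else if i % 4 = 3 then 2 else ii
    let st1 := pvAppendAt st ii' (String.mk [c])
    -- result_indexes - {insert_index}, iterated in increasing order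
    let st2 := (([0, 1, 2].filter (fun k => k ≠ ii')).foldl (fun s k => pvAppendAt s k " ") st1)
    snakeLoopA t (i + 1) ii' st2

def snake_string_v1 (chars : String) : List (List String) :=
  let r := snakeLoopA chars.toList 0 1 ([], [], [])
  [r.1, r.2.1, r.2.2]

-- ===== PORT B =====
def pvRowOf (i : Nat) : Nat := [1, 0, 1, 2].getD (i % 4) 1

-- the inner comprehension of B: one row r over the enumerated characters
def pvRowB (r : Nat) : List Char → Nat → List String
  | [], _ => []
  | c :: t, i => (if pvRowOf i = r then String.mk [c] else " ") :: pvRowB r t (i + 1)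

def snake_string_v1_alt (chars : String) : List (List String) :=
  (List.range 3).map (fun r => pvRowB r chars.toList 0)

-- ===== PRECONDITION & SPEC =====
def Spec_snake_string_v1 (chars : String) (out : List (List String)) : Prop := out = snake_string_v1_alt chars
instance (chars : String) (out : List (List String)) : Decidable (Spec_snake_string_v1 chars out) := by unfold Spec_snake_string_v1; infer_instance

-- ===== CLAIM (what is proved, stated in full; the proofs are below) =====
def Claim_equal_snake_string_v1 : Prop := ∀ (chars : String), Dom_snake_string_v1 chars → Spec_snake_string_v1 chars (snake_string_v1 chars)

-- ===== LEMMAS AND PROOFS =====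
theorem snakeLoopA_eq (l : List Char) : ∀ (i ii : Nat) (st : List String × List String × List String),
    snakeLoopA l i ii st =
      (st.1 ++ pvRowB 0 l i, st.2.1 ++ pvRowB 1 l i, st.2.2 ++ pvRowB 2 l i) := by
  induction l with
  | nil => intro i ii st; simp [snakeLoopA, pvRowB]
  | cons c t IH =>
    intro i ii st
    have h2 : i % 2 = i % 4 % 2 := (Nat.mod_mod_of_dvd i (by norm_num)).symm
    have h4 : i % 4 < 4 := Nat.mod_lt _ (by norm_num)
    rw [snakeLoopA]
    interval_cases h : i % 4 <;>
      simp [h2, h, pvAppendAt, pvRowB, pvRowOf, List.filter, IH]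

theorem snake_string_v1_spec' (chars : String) :
    snake_string_v1 chars = snake_string_v1_alt chars := by
  unfold snake_string_v1 snake_string_v1_alt
  rw [snakeLoopA_eq]
  simp [List.range_succ]

-- ===== VERDICT (by name: the statement is the Claim_ definition above) =====
theorem snake_string_v1_spec : Claim_equal_snake_string_v1 := by
  intro chars _
  unfold Spec_snake_string_v1
  exact snake_string_v1_spec' chars
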